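-- pv_equiv track=rewrite | github.com/perezsaura-david/AdventOfCode2022 | day05/solution_visual.py | makeStructure
-- ===== SOURCE A (Python) =====
-- def makeStructure(structure):
--     columns_id = structure[0]
--
--     columns = []
--     for i in range(len(columns_id)):
--         column = []
--         for row in reversed(structure[:-1]):
--             if row[i] != None:
--                 column.append(row[i])
--         columns.append(column)
--
--     return columns
-- ===== SOURCE B (Python) =====
-- def makeStructure(structure):
--     n = len(structure[0])
--     cols = [[] for _ in range(n)]
--     for row in reversed(structure[:-1]):
--         for i, x in enumerate(row[:n]):
--             if x != None:
--                 cols[i].append(x)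
--     return cols
-- ===== Notes on version B (the rewrite author's own statement) =====
-- stated objective: alternative
-- what changed: A builds each column separately, rescanning all rows once per column (column-major, repeated row passes); B makes a single bottom-up pass over the rows, appending each non-None cell to its column accumulator (row-major loop interchange).
import Mathlib
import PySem

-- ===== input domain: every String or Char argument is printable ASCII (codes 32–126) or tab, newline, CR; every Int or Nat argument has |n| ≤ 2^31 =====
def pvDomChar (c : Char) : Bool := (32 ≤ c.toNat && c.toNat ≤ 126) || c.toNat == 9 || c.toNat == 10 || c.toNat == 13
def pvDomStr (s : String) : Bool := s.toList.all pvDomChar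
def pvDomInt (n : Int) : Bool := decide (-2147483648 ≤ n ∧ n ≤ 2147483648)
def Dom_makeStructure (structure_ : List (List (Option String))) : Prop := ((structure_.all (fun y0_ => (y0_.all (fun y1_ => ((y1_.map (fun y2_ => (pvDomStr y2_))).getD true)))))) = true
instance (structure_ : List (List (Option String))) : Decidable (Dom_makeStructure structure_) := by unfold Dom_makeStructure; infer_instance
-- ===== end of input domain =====

-- B is an alternative of the same cost: one bottom-up row-major pass updating all column
-- accumulators, instead of A's column-major loop that rescans the rows once per column.

-- ===== PORT A =====
def makeStructure (structure_ : List (List (Option String))) : List (List String) :=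
  let columns_id := PySem.List.pyGetD structure_ 0 []      -- structure[0] (IndexError on [] is outside Pre_)
  (PySem.List.pyRange 0 (columns_id.length : Int) 1).foldl (fun columns i =>
    let column :=
      ((PySem.List.slice structure_ none (some (-1))).reverse).foldl (fun column row =>
        match PySem.List.pyGet? row i with    -- row[i]; none = IndexError, outside Pre_
        | some (some x) => column ++ [x]      -- row[i] != None: append
        | _ => column) []
    columns ++ [column]) []

-- ===== PORT B =====
def makeStructure_alt (structure_ : List (List (Option String))) : List (List String) :=
  let n := (PySem.List.pyGetD structure_ 0 []).length      -- len(structure[0])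
  let cols := (List.range n).map (fun _ => ([] : List String))
  ((PySem.List.slice structure_ none (some (-1))).reverse).foldl (fun cols row =>
    (PySem.List.enumerate (PySem.List.slice row none (some (n : Int)))).foldl (fun cols p =>
      match p.2 with
      | some x => PySem.List.pySetD cols p.1 (PySem.List.pyGetD cols p.1 [] ++ [x])
      | none => cols) cols) cols

-- ===== PRECONDITION & SPEC =====
-- Pre_ excludes exactly the inputs where A raises IndexError: the empty list (structure[0])
-- and inputs where some row of structure[:-1] is shorter than the header structure[0].
def Pre_makeStructure (structure_ : List (List (Option String))) : Prop :=
  structure_ ≠ [] ∧ ∀ row ∈ structure_.dropLast, (structure_.headD []).length ≤ row.length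
instance (structure_ : List (List (Option String))) : Decidable (Pre_makeStructure structure_) := by unfold Pre_makeStructure; infer_instance
def pvWitness_makeStructure : List (List (Option String)) :=
  [[some "A", none], [none, some "B"], [some "1", some "2"]]

def Spec_makeStructure (structure_ : List (List (Option String))) (out : List (List String)) : Prop := out = makeStructure_alt structure_
instance (structure_ : List (List (Option String))) (out : List (List String)) : Decidable (Spec_makeStructure structure_ out) := by unfold Spec_makeStructure; infer_instance

-- ===== CLAIM (what is proved, stated in full; the proofs are below) =====
def Claim_equal_makeStructure : Prop := ∀ (structure_ : List (List (Option String))), Dom_makeStructure structure_ → Pre_makeStructure structure_ → Spec_makeStructure structure_ (makeStructure structure_)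

-- ===== LEMMAS AND PROOFS =====

-- the value the cell (row, k) contributes: some x iff row[k] (within the first n cells) is x
def pvCell (n : Nat) (row : List (Option String)) (k : Nat) : Option String :=
  (row.take n).getD k none

-- B's inner loop (one row): step function
def pvStepCell (cols : List (List String)) (p : Int × Option String) : List (List String) :=
  match p.2 with
  | some x => PySem.List.pySetD cols p.1 (PySem.List.pyGetD cols p.1 [] ++ [x])
  | none => cols

-- inner loop characterisation
lemma pvInner (ys : List (Option String)) (s0 : Nat) (cols : List (List String))
    (hb : s0 + ys.length ≤ cols.length) :
    (PySem.List.enumerate ys (s0 : Int)).foldl pvStepCell cols =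
      (List.range cols.length).map (fun k =>
        cols.getD k [] ++ (if s0 ≤ k then (ys.getD (k - s0) none).toList else [])) := by
  induction ys generalizing s0 cols with
  | nil =>
      simp only [PySem.List.enumerate_nil, List.foldl_nil]
      refine List.ext_getElem (by simp) ?_
      intro k h1 h2
      simp_all [List.getD_eq_getElem?_getD, List.getElem?_eq_getElem h1]
  | cons y ys ih =>
      rw [PySem.List.enumerate_cons, List.foldl_cons]
      have hstep : pvStepCell cols ((s0 : Int), y) =
          (List.range cols.length).map (fun k =>
            cols.getD k [] ++ (if k = s0 then y.toList else [])) := by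
        have hs0 : s0 < cols.length := by simp at hb; omega
        unfold pvStepCell
        cases y with
        | none =>
            refine List.ext_getElem (by simp) ?_
            intro k h1 h2
            simp_all [List.getD_eq_getElem?_getD, List.getElem?_eq_getElem h1]
        | some x =>
            simp only [PySem.List.pySetD_natCast, PySem.List.pyGetD_natCast]
            refine List.ext_getElem (by simp) ?_
            intro k h1 h2
            simp only [List.length_set] at h1
            rw [List.getElem_set]
            simp only [List.getElem_map, List.getElem_range]
            by_cases hk : s0 = k
            · subst hk
              simp [List.getD_eq_getElem?_getD, List.getElem?_eq_getElem hs0]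
            · simp [hk, Ne.symm hk, List.getD_eq_getElem?_getD, List.getElem?_eq_getElem h1]
      rw [hstep]
      have hcast : ((s0 : Int) + 1) = (((s0 + 1 : Nat)) : Int) := by push_cast; ring
      rw [hcast, ih (s0 + 1) _ (by simp; simp at hb; omega)]
      refine List.ext_getElem (by simp) ?_
      intro k h1 h2
      simp only [List.length_map, List.length_range] at h1 h2
      simp only [List.getElem_map, List.getElem_range]
      have hg : ∀ (f : Nat → List String),
          (List.map f (List.range cols.length)).getD k [] = f k := by
        intro f
        simp [List.getD_eq_getElem?_getD, List.getElem?_map, List.getElem?_range, h1]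
      rw [hg]
      by_cases hk : k = s0
      · subst hk
        simp
      · by_cases hk2 : s0 + 1 ≤ k
        · have h3 : s0 ≤ k := by omega
          have h4 : k - s0 = (k - (s0 + 1)) + 1 := by omega
          simp [hk, hk2, h3, h4]
        · have h3 : ¬ s0 ≤ k := by omega
          simp [hk, hk2, h3]

-- B's outer loop characterisation
lemma pvOuter (n : Nat) (rows : List (List (Option String))) (cols : List (List String))
    (hc : cols.length = n) :
    rows.foldl (fun cols row =>
        (PySem.List.enumerate (PySem.List.slice row none (some (n : Int)))).foldl pvStepCell cols) cols =
      (List.range n).map (fun k =>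
        cols.getD k [] ++ rows.filterMap (fun row => pvCell n row k)) := by
  induction rows generalizing cols with
  | nil =>
      subst hc
      refine List.ext_getElem (by simp) ?_
      intro k h1 h2
      simp only [List.length_map, List.length_range] at h2
      simp [List.getD_eq_getElem?_getD, List.getElem?_eq_getElem h2]
  | cons row rows ih =>
      rw [List.foldl_cons]
      have h0 : (PySem.List.slice row none (some (n : Int))) = row.take n :=
        PySem.List.slice_to_natCast row n
      have hlen : (row.take n).length ≤ cols.length := by simp [hc]
      have hin := pvInner (row.take n) 0 cols (by omega)
      simp only [Nat.cast_zero] at hin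
      rw [h0, hin, ih _ (by simp [hc])]
      refine List.ext_getElem (by simp) ?_
      intro k h1 h2
      simp only [List.length_map, List.length_range] at h1 h2
      simp only [List.getElem_map, List.getElem_range, List.filterMap_cons]
      have hget : (List.map (fun k => cols.getD k [] ++ (if 0 ≤ k then ((row.take n).getD (k - 0) none).toList else [])) (List.range cols.length)).getD k [] =
          cols.getD k [] ++ ((row.take n).getD k none).toList := by
        have hk' : k < cols.length := by omega
        simp [List.getD_eq_getElem?_getD, List.getElem?_map, List.getElem?_range, hk',
          List.getElem?_eq_getElem hk']
      rw [hget]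
      unfold pvCell
      cases hcell : (row.take n).getD k none with
      | none => simp
      | some x => simp

-- A's inner loop equals the filterMap over the rows
lemma pvColA (i : Int) (rows : List (List (Option String))) (acc : List String) :
    rows.foldl (fun column row =>
        match PySem.List.pyGet? row i with
        | some (some x) => column ++ [x]
        | _ => column) acc =
      acc ++ rows.filterMap (fun row =>
        match PySem.List.pyGet? row i with
        | some (some x) => some x
        | _ => none) := by
  induction rows generalizing acc with
  | nil => simp
  | cons row rows ih =>
      rw [List.foldl_cons, List.filterMap_cons, ih]
      cases h : PySem.List.pyGet? row i with
      | none => simp [h]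
      | some o => cases o <;> simp [h]

-- under Pre_, A's cell read agrees with pvCell
lemma pvCell_eq (n k : Nat) (row : List (Option String)) (hk : k < n) (hn : n ≤ row.length) :
    (match PySem.List.pyGet? row ((k : Nat) : Int) with
      | some (some x) => some x
      | _ => none) = pvCell n row k := by
  have hk' : k < row.length := by omega
  have hkt : k < (row.take n).length := by simp; omega
  rw [PySem.List.pyGet?_natCast, List.getElem?_eq_getElem hk']
  unfold pvCell
  rw [List.getD_eq_getElem?_getD, List.getElem?_eq_getElem hkt]
  simp [List.getElem_take]
  cases row[k] <;> simp

-- ===== VERDICT (by name: the statement is the Claim_ definition above) =====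
theorem makeStructure_spec : Claim_equal_makeStructure := by
  intro s _ hpre
  obtain ⟨hne, hrows⟩ := hpre
  unfold Spec_makeStructure
  have hhead : PySem.List.pyGetD s 0 [] = s.headD [] := by
    cases s with
    | nil => exact absurd rfl hne
    | cons a t => simp [PySem.List.pyGetD_zero_cons]
  have hslice : PySem.List.slice s none (some (-1)) = s.dropLast :=
    PySem.List.slice_to_neg_one s
  have hmem : ∀ row ∈ s.dropLast.reverse, (s.headD []).length ≤ row.length :=
    fun row hr => hrows row (List.mem_reverse.mp hr)
  have hB : makeStructure_alt s =
      (List.range (s.headD []).length).map (fun k =>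
        s.dropLast.reverse.filterMap (fun row => pvCell (s.headD []).length row k)) := by
    show ((PySem.List.slice s none (some (-1))).reverse).foldl
        (fun cols row =>
          (PySem.List.enumerate (PySem.List.slice row none
            (some ((PySem.List.pyGetD s 0 []).length : Int)))).foldl pvStepCell cols)
        ((List.range (PySem.List.pyGetD s 0 []).length).map (fun _ => ([] : List String))) = _
    rw [hhead, hslice]
    rw [pvOuter (s.headD []).length s.dropLast.reverse _ (by simp)]
    refine List.map_congr_left ?_
    intro k hk
    rw [List.mem_range] at hk
    simp [List.getD_eq_getElem?_getD, List.getElem?_map, List.getElem?_range, hk]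
  have hA : makeStructure s =
      (List.range (s.headD []).length).map (fun k =>
        s.dropLast.reverse.filterMap (fun row => pvCell (s.headD []).length row k)) := by
    show (PySem.List.pyRange 0 ((PySem.List.pyGetD s 0 []).length : Int) 1).foldl (fun columns i =>
        columns ++ [((PySem.List.slice s none (some (-1))).reverse).foldl (fun column row =>
          match PySem.List.pyGet? row i with
          | some (some x) => column ++ [x]
          | _ => column) []]) [] = _
    rw [hhead, hslice]
    rw [PySem.List.foldl_append_singleton_eq_map (f := fun i =>
      s.dropLast.reverse.foldl (fun column row =>
        match PySem.List.pyGet? row i with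
        | some (some x) => column ++ [x]
        | _ => column) [])]
    rw [PySem.List.pyRange_zero_natCast, List.nil_append, List.map_map]
    refine List.map_congr_left ?_
    intro k hk
    rw [List.mem_range] at hk
    simp only [Function.comp]
    rw [pvColA, List.nil_append]
    refine List.filterMap_congr ?_
    intro row hr
    exact pvCell_eq (s.headD []).length k row hk (hmem row hr)
  rw [hA, hB]
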